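-- pv_equiv track=rewrite | github.com/aryarksub/HotHandHypothesis | src/probability.py | generate_shot_sequences
-- ===== SOURCE A (Python) =====
-- def generate_shot_sequences(N):
--     # Generate all possible shot sequences of length N: (s_1, s_2, ..., s_N)
--     # These represent the immediately previous shot, 2nd prev shot, etc.
--     # Output is ordered as follows:
--     #   1. Number of shots made (e.g. 000 comes before 001, 010, 100)
--     #   2. Most recent shot made (e.g. 0011 < 0101 < 0110 < 1001)
--     # Sequence defined formally here: https://oeis.org/A294648
--
--     def to_padded_binary(val):
--         return bin(val)[2:].zfill(N)
--
--     dp = [[[] for _ in range(N+1)] for _ in range(N+1)]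
--     for n in range(N+1):
--         dp[n][0] = [0]
--         dp[n][n] = [2**n - 1]
--     for n in range(N+1):
--         for k in range(1, n):
--             dp[n][k] = dp[n-1][k] + [2**(n-1) + x for x in dp[n-1][k-1]]
--
--     return [to_padded_binary(sequence) for k in range(N+1) for sequence in dp[N][k]]
-- ===== SOURCE B (Python) =====
-- def generate_shot_sequences(N):
--     # All length-N bit strings, ordered by number of ones, then by value:
--     # one pass per popcount k over the integers 0..2**N-1.
--     return [format(v, "b").zfill(N)
--             for k in range(N + 1)
--             for v in range(2 ** N)
--             if v.bit_count() == k]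
-- ===== Notes on version B (the rewrite author's own statement) =====
-- stated objective: simpler
-- what changed: A builds an (N+1)x(N+1) DP table of value lists via the recurrence dp[n][k] = dp[n-1][k] + [2^(n-1)+x for x in dp[n-1][k-1]]; B drops the table entirely and, for each popcount k = 0..N, emits the binary strings of the values 0..2^N-1 whose bit_count equals k, in one filtering comprehension.
import Mathlib
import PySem

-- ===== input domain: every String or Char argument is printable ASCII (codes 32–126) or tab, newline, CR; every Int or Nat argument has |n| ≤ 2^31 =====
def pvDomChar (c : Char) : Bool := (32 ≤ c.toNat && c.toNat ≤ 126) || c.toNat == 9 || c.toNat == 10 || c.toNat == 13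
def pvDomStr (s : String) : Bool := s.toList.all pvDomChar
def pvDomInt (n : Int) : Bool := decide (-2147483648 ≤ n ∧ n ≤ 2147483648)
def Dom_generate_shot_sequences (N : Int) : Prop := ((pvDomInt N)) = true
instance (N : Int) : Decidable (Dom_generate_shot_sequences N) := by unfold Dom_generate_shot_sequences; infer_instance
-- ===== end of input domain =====

-- B replaces A's DP-table recurrence by a direct per-popcount filtering pass over
-- the integers 0..2^N-1 (objective: simpler).

-- ===== PORT A =====

-- Python's binary digit string of a nonnegative integer, i.e. bin(v)[2:] / format(v, 'b')
-- (exact for v ≥ 0; every value both programs format is ≥ 0).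
def binChars (v : Nat) : List Char :=
  if h : v < 2 then [if v = 1 then '1' else '0']
  else binChars (v / 2) ++ [if v % 2 = 1 then '1' else '0']
decreasing_by exact Nat.div_lt_self (by omega) (by omega)

-- dp[n][k] = v / dp[n][k] (exact for the in-range nonnegative indices A uses)
def dpSet (dp : List (List (List Int))) (n k : Int) (v : List Int) : List (List (List Int)) :=
  dp.set n.toNat ((dp.getD n.toNat []).set k.toNat v)
def dpGet (dp : List (List (List Int))) (n k : Int) : List Int :=
  (dp.getD n.toNat []).getD k.toNat []

def generate_shot_sequences (N : Int) : List String :=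
  -- to_padded_binary(val) = bin(val)[2:].zfill(N)
  let to_padded_binary : Int → String :=
    fun val => String.mk (PySem.Chars.zfill (binChars val.toNat) N)
  let ns := PySem.List.pyRange 0 (N + 1) 1
  let dp0 : List (List (List Int)) := ns.map (fun _ => ns.map (fun _ => ([] : List Int)))
  let dp1 := ns.foldl (fun dp n =>
    dpSet (dpSet dp n 0 [0]) n n [(2 : Int) ^ n.toNat - 1]) dp0
  let dp2 := ns.foldl (fun dp n =>
    (PySem.List.pyRange 1 n 1).foldl (fun dp k =>
      dpSet dp n k (dpGet dp (n - 1) k ++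
        (dpGet dp (n - 1) (k - 1)).map (fun x => (2 : Int) ^ (n - 1).toNat + x))) dp) dp1
  ns.flatMap (fun k => (dpGet dp2 N k).map (fun sequence => to_padded_binary sequence))

-- ===== PORT B =====
def generate_shot_sequences_alt (N : Int) : List String :=
  (PySem.List.pyRange 0 (N + 1) 1).flatMap (fun k =>
    ((PySem.List.pyRange 0 ((2 : Int) ^ N.toNat) 1).filter
        (fun v => ((PySem.Int.bitCount v : Int)) == k)).map
      (fun v => String.mk (PySem.Chars.zfill (binChars v.toNat) N)))

-- ===== PRECONDITION & SPEC =====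
def Spec_generate_shot_sequences (N : Int) (out : List String) : Prop := out = generate_shot_sequences_alt N
instance (N : Int) (out : List String) : Decidable (Spec_generate_shot_sequences N out) := by unfold Spec_generate_shot_sequences; infer_instance

-- ===== CLAIM (what is proved, stated in full; the proofs are below) =====
def Claim_equal_generate_shot_sequences : Prop := ∀ (N : Int), Dom_generate_shot_sequences N → Spec_generate_shot_sequences N (generate_shot_sequences N)

-- ===== LEMMAS AND PROOFS =====

-- Nat-indexed views of the dp table operations
def get2 (dp : List (List (List Int))) (i j : Nat) : List Int := (dp.getD i []).getD j []
def set2 (dp : List (List (List Int))) (i j : Nat) (v : List Int) : List (List (List Int)) :=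
  dp.set i ((dp.getD i []).set j v)

def Shaped (n : Nat) (dp : List (List (List Int))) : Prop :=
  dp.length = n + 1 ∧ ∀ r ∈ dp, r.length = n + 1

-- the initial table and the two fold bodies of A, Nat-indexed
def dp0 (n : Nat) : List (List (List Int)) :=
  (List.range (n + 1)).map (fun _ => (List.range (n + 1)).map (fun _ => ([] : List Int)))
def F1 (dp : List (List (List Int))) (i : Nat) : List (List (List Int)) :=
  set2 (set2 dp i 0 [0]) i i [(2 : Int) ^ i - 1]
def G (i : Nat) (dp : List (List (List Int))) (k : Nat) : List (List (List Int)) :=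
  set2 dp i (k + 1) (get2 dp (i - 1) (k + 1) ++
    (get2 dp (i - 1) k).map (fun x => (2 : Int) ^ (i - 1) + x))
def F2 (dp : List (List (List Int))) (i : Nat) : List (List (List Int)) :=
  (List.range (i - 1)).foldl (G i) dp

-- row contents after the first (boundary) loop
def bnd (i j : Nat) : List Int := if j = i then [(2 : Int) ^ i - 1] else if j = 0 then [0] else []

-- the final dp table contents
def E : Nat → Nat → List Int
  | i, j =>
    if j = i then [(2 : Int) ^ i - 1]
    else if j = 0 then [0]
    else if _h : j < i then
      E (i - 1) j ++ (E (i - 1) (j - 1)).map (fun x => (2 : Int) ^ (i - 1) + x)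
    else []
decreasing_by all_goals omega

def bc (v : Nat) : Nat := PySem.Int.bitCount (v : Int)

-- the spec list: values < 2^i with popcount j, ascending
def SL (i j : Nat) : List Int :=
  ((List.range (2 ^ i)).filter (fun v => bc v == j)).map (fun (v : Nat) => (v : Int))

-- the common normal form of both programs
def target (n : Nat) : List String :=
  (List.range (n + 1)).flatMap (fun k =>
    ((List.range (2 ^ n)).filter (fun v => bc v == k)).map
      (fun v => String.mk (PySem.Chars.zfill (binChars v) (n : Int))))

-- ### table plumbing

lemma row_len {n : Nat} {dp : List (List (List Int))} (h : Shaped n dp) {i : Nat} (hi : i ≤ n) :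
    (dp.getD i []).length = n + 1 := by
  obtain ⟨hl, hr⟩ := h
  have hlt : i < dp.length := by omega
  rw [List.getD, List.getElem?_eq_getElem hlt]
  exact hr _ (List.getElem_mem hlt)

lemma shaped_set2 {n : Nat} {dp : List (List (List Int))} (h : Shaped n dp) {i j : Nat}
    (hi : i ≤ n) (hj : j ≤ n) (v : List Int) : Shaped n (set2 dp i j v) := by
  obtain ⟨hl, hr⟩ := h
  refine ⟨by simp [set2, hl], ?_⟩
  intro r hrmem
  rcases List.mem_or_eq_of_mem_set hrmem with hm | he
  · exact hr _ hm
  · subst he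
    rw [List.length_set]
    exact row_len ⟨hl, hr⟩ hi

lemma get2_set2 {n : Nat} {dp : List (List (List Int))} (h : Shaped n dp) {i j : Nat}
    (hi : i ≤ n) (hj : j ≤ n) (v : List Int) (i' j' : Nat) :
    get2 (set2 dp i j v) i' j' = if i = i' ∧ j = j' then v else get2 dp i' j' := by
  have hil : i < dp.length := by have := h.1; omega
  have hjl : j < (dp.getD i []).length := by rw [row_len h hi]; omega
  unfold get2 set2
  by_cases hii : i = i'
  · subst hii
    simp only [List.getD]
    rw [List.getElem?_set_self hil, Option.getD_some]
    by_cases hjj : j = j'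
    · subst hjj
      have hjl' : j < (dp[i]?.getD []).length := by
        rw [← List.getD]; exact hjl
      rw [List.getElem?_set_self hjl']
      simp
    · rw [List.getElem?_set_ne hjj]
      simp [hjj]
  · simp only [List.getD]
    rw [List.getElem?_set_ne hii]
    simp [hii]

lemma shaped_foldl {n : Nat} {f : List (List (List Int)) → Nat → List (List (List Int))}
    {P : Nat → Prop} (hf : ∀ dp i, Shaped n dp → P i → Shaped n (f dp i)) :
    ∀ (l : List Nat), (∀ x ∈ l, P x) → ∀ dp, Shaped n dp → Shaped n (l.foldl f dp) := by
  intro l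
  induction l with
  | nil => intro _ dp h; exact h
  | cons a l ih =>
      intro hl dp h
      exact ih (fun x hx => hl x (List.mem_cons_of_mem _ hx)) _
        (hf dp a h (hl a (List.mem_cons_self)))

lemma shaped_dp0 (n : Nat) : Shaped n (dp0 n) := by
  constructor
  · simp [dp0]
  · intro r hr
    simp only [dp0, List.mem_map] at hr
    obtain ⟨_, _, hre⟩ := hr
    simp [← hre]

lemma get2_dp0 (n : Nat) {i j : Nat} (hi : i ≤ n) (hj : j ≤ n) : get2 (dp0 n) i j = [] := by
  have h1 : i < n + 1 := by omega
  have h2 : j < n + 1 := by omega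
  simp [get2, dp0, List.getD, List.getElem?_map, List.getElem?_range, h1, h2]

lemma shaped_F1 {n : Nat} : ∀ dp i, Shaped n dp → i ≤ n → Shaped n (F1 dp i) := by
  intro dp i h hi
  exact shaped_set2 (shaped_set2 h hi (by omega) _) hi hi _

lemma shaped_F2 {n : Nat} : ∀ dp i, Shaped n dp → i ≤ n → Shaped n (F2 dp i) := by
  intro dp i h hi
  refine shaped_foldl (f := G i) (P := fun k => k + 1 ≤ n) ?_ _ ?_ dp h
  · intro dp' k h' hk
    exact shaped_set2 h' hi hk _
  · intro x hx
    rw [List.mem_range] at hx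
    omega

-- contents after the boundary loop
lemma fold1_get2 (n : Nat) : ∀ m, m ≤ n + 1 → ∀ i j, i ≤ n → j ≤ n →
    get2 ((List.range m).foldl F1 (dp0 n)) i j = if i < m then bnd i j else [] := by
  intro m
  induction m with
  | zero => intro _ i j hi hj; simpa using get2_dp0 n hi hj
  | succ m ih =>
      intro hm i j hi hj
      have hmn : m ≤ n := by omega
      have hS : Shaped n ((List.range m).foldl F1 (dp0 n)) :=
        shaped_foldl shaped_F1 _ (fun x hx => by rw [List.mem_range] at hx; omega) _ (shaped_dp0 n)
      rw [List.range_succ, List.foldl_append, List.foldl_cons, List.foldl_nil]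
      have hs0 : Shaped n (set2 ((List.range m).foldl F1 (dp0 n)) m 0 [0]) :=
        shaped_set2 hS hmn (Nat.zero_le n) _
      rw [F1, get2_set2 (i := m) (j := m) hs0 hmn hmn _ i j,
        get2_set2 (i := m) (j := 0) hS hmn (Nat.zero_le n) _ i j, ih (by omega) i j hi hj]
      simp only [bnd]
      split_ifs <;> first | rfl | omega | simp_all

-- contents of row m while the inner fill loop runs
lemma fold2_inner (n m : Nat) (hm : m ≤ n) (dp : List (List (List Int))) (hS : Shaped n dp)
    (hdp : ∀ i j, i ≤ n → j ≤ n → get2 dp i j = if i < m then E i j else bnd i j) :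
    ∀ t, t ≤ m - 1 → ∀ i j, i ≤ n → j ≤ n →
      get2 ((List.range t).foldl (G m) dp) i j =
        if i = m ∧ 1 ≤ j ∧ j ≤ t then E m j else if i < m then E i j else bnd i j := by
  intro t
  induction t with
  | zero =>
      intro _ i j hi hj
      rw [List.range_zero, List.foldl_nil, hdp i j hi hj]
      have hno : ¬ (i = m ∧ 1 ≤ j ∧ j ≤ 0) := by omega
      rw [if_neg hno]
  | succ t ih =>
      intro ht i j hi hj
      have ht' : t ≤ m - 1 := by omega
      have hm2 : 2 ≤ m := by omega
      have hSt : Shaped n ((List.range t).foldl (G m) dp) := by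
        refine shaped_foldl (f := G m) (P := fun k => k + 1 ≤ n) ?_ _ ?_ dp hS
        · intro dp' k h' hk; exact shaped_set2 h' hm hk _
        · intro x hx; rw [List.mem_range] at hx; omega
      rw [List.range_succ, List.foldl_append, List.foldl_cons, List.foldl_nil]
      rw [G, get2_set2 (i := m) (j := t + 1) hSt hm (by omega) _ i j]
      rw [ih ht' (m - 1) (t + 1) (by omega) (by omega),
        ih ht' (m - 1) t (by omega) (by omega), ih ht' i j hi hj]
      have hne : ¬ (m - 1 = m) := by omega
      have h1 : (if m - 1 = m ∧ 1 ≤ t + 1 ∧ t + 1 ≤ t then E m (t + 1)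
          else if m - 1 < m then E (m - 1) (t + 1) else bnd (m - 1) (t + 1)) = E (m - 1) (t + 1) := by
        simp [hne, Nat.sub_lt (by omega : 0 < m) one_pos]
      have h2 : (if m - 1 = m ∧ 1 ≤ t ∧ t ≤ t then E m t
          else if m - 1 < m then E (m - 1) t else bnd (m - 1) t) = E (m - 1) t := by
        simp [hne, Nat.sub_lt (by omega : 0 < m) one_pos]
      rw [h1, h2]
      have hEm : E (m - 1) (t + 1) ++ (E (m - 1) t).map (fun x => (2 : Int) ^ (m - 1) + x)
          = E m (t + 1) := by
        have c1 : ¬ (t + 1 = m) := by omega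
        have c2 : ¬ (t + 1 = 0) := by omega
        have c3 : t + 1 < m := by omega
        conv_rhs => rw [E]
        rw [if_neg c1, if_neg c2, dif_pos c3, Nat.add_sub_cancel]
      rw [hEm]
      by_cases him : i = m
      · by_cases hjt : j = t + 1
        · subst hjt
          rw [if_pos ⟨him.symm, rfl⟩, if_pos ⟨him, by omega, by omega⟩]
        · rw [if_neg (by omega : ¬ (m = i ∧ t + 1 = j))]
          by_cases hj1 : 1 ≤ j ∧ j ≤ t
          · rw [if_pos ⟨him, hj1.1, hj1.2⟩, if_pos ⟨him, by omega, by omega⟩]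
          · rw [if_neg (by omega : ¬ (i = m ∧ 1 ≤ j ∧ j ≤ t)),
              if_neg (by omega : ¬ (i = m ∧ 1 ≤ j ∧ j ≤ t + 1))]
      · rw [if_neg (by omega : ¬ (m = i ∧ t + 1 = j)),
          if_neg (by omega : ¬ (i = m ∧ 1 ≤ j ∧ j ≤ t)),
          if_neg (by omega : ¬ (i = m ∧ 1 ≤ j ∧ j ≤ t + 1))]

-- contents after the fill loop
lemma fold2_get2 (n : Nat) : ∀ m, m ≤ n + 1 → ∀ i j, i ≤ n → j ≤ n →
    get2 ((List.range m).foldl F2 ((List.range (n + 1)).foldl F1 (dp0 n))) i j =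
      if i < m then E i j else bnd i j := by
  intro m
  induction m with
  | zero =>
      intro _ i j hi hj
      rw [List.range_zero, List.foldl_nil, fold1_get2 n (n + 1) le_rfl i j hi hj]
      simp [Nat.lt_succ_of_le hi]
  | succ m ih =>
      intro hm i j hi hj
      have hmn : m ≤ n := by omega
      have hSB : Shaped n ((List.range (n + 1)).foldl F1 (dp0 n)) :=
        shaped_foldl shaped_F1 _ (fun x hx => by rw [List.mem_range] at hx; omega) _ (shaped_dp0 n)
      have hSt : Shaped n ((List.range m).foldl F2 ((List.range (n + 1)).foldl F1 (dp0 n))) :=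
        shaped_foldl shaped_F2 _ (fun x hx => by rw [List.mem_range] at hx; omega) _ hSB
      rw [show List.range (m + 1) = List.range m ++ [m] from List.range_succ,
        List.foldl_append, List.foldl_cons, List.foldl_nil]
      have hF2 : ∀ X, F2 X m = (List.range (m - 1)).foldl (G m) X := fun _ => rfl
      rw [hF2, fold2_inner n m hmn _ hSt (fun i j hi hj => ih (by omega) i j hi hj)
        (m - 1) le_rfl i j hi hj]
      by_cases him : i = m
      · subst him
        by_cases hj1 : 1 ≤ j ∧ j ≤ i - 1
        · have e1 : (i = i ∧ 1 ≤ j ∧ j ≤ i - 1) := ⟨rfl, hj1⟩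
          simp [e1]
        · have e1 : ¬ (i = i ∧ 1 ≤ j ∧ j ≤ i - 1) := by omega
          simp only [if_false, lt_irrefl, Nat.lt_succ_self, if_true]
          -- goal: bnd i j = E i j for j = 0 or j ≥ i
          rw [E, bnd]
          by_cases hji : j = i
          · simp [hji]
          · by_cases hj0 : j = 0
            · simp [hj0]
            · have : ¬ j < i := by omega
              simp [hji, hj0, this]
      · have e1 : ¬ (i = m ∧ 1 ≤ j ∧ j ≤ m - 1) := by omega
        have : (i < m) = (i < m + 1) := by
          rw [eq_iff_iff]; omega
        simp [e1, this]

-- ### popcount lemmas (bc v = v.bit_count())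

lemma bc_halve (v : Nat) : bc v = v % 2 + bc (v / 2) := by
  rcases Nat.eq_zero_or_pos v with h | h
  · subst h; simp [bc, PySem.Int.bitCount_zero]
  · exact PySem.Int.bitCount_natCast h

lemma bc_zero : bc 0 = 0 := by simp [bc, PySem.Int.bitCount_zero]

lemma bc_eq_zero_iff (v : Nat) : bc v = 0 ↔ v = 0 := by
  induction v using Nat.strong_induction_on with
  | _ v ih =>
      constructor
      · intro h
        rcases Nat.eq_zero_or_pos v with h0 | h0
        · exact h0
        · rw [bc_halve] at h
          have h2 : v / 2 = 0 := (ih (v / 2) (Nat.div_lt_self h0 one_lt_two)).1 (by omega)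
          omega
      · intro h; subst h; exact bc_zero

lemma bc_le (m : Nat) : ∀ v, v < 2 ^ m → bc v ≤ m := by
  induction m with
  | zero => intro v hv; interval_cases v; simp [bc_zero]
  | succ m ih =>
      intro v hv
      rcases Nat.eq_zero_or_pos v with h0 | h0
      · subst h0; simp [bc_zero]
      · rw [bc_halve]
        have : v / 2 < 2 ^ m := by
          have := Nat.pow_succ 2 m
          omega
        have := ih (v / 2) this
        omega

lemma bc_add_pow (m : Nat) : ∀ v, v < 2 ^ m → bc (2 ^ m + v) = bc v + 1 := by
  induction m with
  | zero =>
      intro v hv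
      interval_cases v
      decide
  | succ m ih =>
      intro v hv
      have hpow : 2 ^ (m + 1) = 2 * 2 ^ m := by rw [Nat.pow_succ]; ring
      have hmod : (2 ^ (m + 1) + v) % 2 = v % 2 := by omega
      have hdiv : (2 ^ (m + 1) + v) / 2 = 2 ^ m + v / 2 := by omega
      have hv2 : v / 2 < 2 ^ m := by omega
      rw [bc_halve (2 ^ (m + 1) + v), hmod, hdiv, ih _ hv2, bc_halve v]
      omega

-- ### the spec lists

lemma SL_gt {i j : Nat} (h : i < j) : SL i j = [] := by
  rw [SL, List.filter_eq_nil_iff.mpr, List.map_nil]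
  intro v hv
  rw [List.mem_range] at hv
  have := bc_le i v hv
  simp only [beq_iff_eq]
  omega

lemma filter_eq_zero_range (m : Nat) (h : 0 < m) :
    (List.range m).filter (fun v => v == 0) = [0] := by
  induction m with
  | zero => omega
  | succ m ih =>
      rw [List.range_succ, List.filter_append]
      rcases Nat.eq_zero_or_pos m with h0 | h0
      · subst h0; decide
      · rw [ih h0]
        have : ¬ (m == 0) = true := by simp; omega
        simp [List.filter, this]

lemma SL_zero (i : Nat) : SL i 0 = [0] := by
  rw [SL, List.filter_congr (q := fun v => v == 0) (by intro v _; rw [Bool.eq_iff_iff]; simp [bc_eq_zero_iff]),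
    filter_eq_zero_range _ (Nat.two_pow_pos i)]
  simp

lemma SL_rec (i j : Nat) (hj : 1 ≤ j) :
    SL (i + 1) j = SL i j ++ (SL i (j - 1)).map (fun x => (2 : Int) ^ i + x) := by
  have hpow : 2 ^ (i + 1) = 2 ^ i + 2 ^ i := by rw [Nat.pow_succ]; ring
  unfold SL
  rw [hpow, List.range_add, List.filter_append, List.map_append]
  congr 1
  rw [List.filter_map,
    List.filter_congr (l := List.range (2 ^ i)) (q := fun v => bc v == j - 1) ?_,
    List.map_map, List.map_map]
  · apply List.map_congr_left
    intro a _
    simp only [Function.comp_apply]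
    push_cast
    ring
  · intro v hv
    rw [List.mem_range] at hv
    rw [Bool.eq_iff_iff]
    simp only [Function.comp_apply, beq_iff_eq]
    rw [bc_add_pow i v hv]
    omega

lemma SL_diag (i : Nat) : SL i i = [(2 : Int) ^ i - 1] := by
  induction i with
  | zero => rw [SL_zero 0]; norm_num
  | succ i ih =>
      rw [SL_rec i (i + 1) (by omega), SL_gt (by omega)]
      simp only [Nat.add_sub_cancel, ih, List.map_cons, List.map_nil, List.nil_append]
      congr 2
      ring

lemma E_eq_SL : ∀ i j, E i j = SL i j := by
  intro i
  induction i with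
  | zero =>
      intro j
      rcases Nat.eq_zero_or_pos j with h0 | h0
      · subst h0
        rw [E, SL_zero]
        norm_num
      · rw [E, if_neg (by omega : ¬ j = 0), if_neg (by omega : ¬ j = 0),
          dif_neg (by omega : ¬ j < 0), SL_gt h0]
  | succ i ih =>
      intro j
      rw [E]
      by_cases hji : j = i + 1
      · subst hji; simp [SL_diag]
      · by_cases hj0 : j = 0
        · subst hj0; simp [SL_zero]
        · by_cases hjlt : j < i + 1
          · simp only [hji, hj0, hjlt, if_false, dif_pos, Nat.add_sub_cancel]
            rw [ih j, ih (j - 1), SL_rec i j (by omega)]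
          · simp only [hji, hj0, hjlt, if_false, dif_neg, not_false_iff]
            rw [SL_gt (by omega)]

-- ### characterizing the two ports

lemma flatMap_congr_range (n : Nat) (f g : Nat → List String)
    (h : ∀ k ∈ List.range n, f k = g k) :
    (List.range n).flatMap f = (List.range n).flatMap g := by
  rw [List.flatMap_def, List.flatMap_def, List.map_congr_left h]

lemma pyRange_succ_natCast (n : Nat) :
    PySem.List.pyRange 0 ((n : Int) + 1) 1 = (List.range (n + 1)).map (fun (k : Nat) => (k : Int)) := by
  have h : ((n : Int) + 1) = ((n + 1 : Nat) : Int) := by push_cast; ring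
  rw [h, PySem.List.pyRange_zero_natCast]

lemma A_char (n : Nat) : generate_shot_sequences (n : Int) = target n := by
  simp only [generate_shot_sequences]
  rw [pyRange_succ_natCast n]
  rw [List.foldl_map, List.foldl_map, List.flatMap_map]
  -- the initial table is dp0
  have hdp0 : (((List.range (n + 1)).map (fun (k : Nat) => (k : Int))).map
      (fun _ => ((List.range (n + 1)).map (fun (k : Nat) => (k : Int))).map (fun _ => ([] : List Int))))
      = dp0 n := by
    simp [dp0, List.map_map, Function.comp_def]
  rw [hdp0]
  -- the boundary loop body is F1
  have hF1 : (fun (dp : List (List (List Int))) (k : Nat) =>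
      dpSet (dpSet dp ((k : Int)) 0 [0]) ((k : Int)) ((k : Int)) [(2 : Int) ^ ((k : Int)).toNat - 1]) = F1 := by
    funext dp k
    simp [dpSet, F1, set2]
  rw [hF1]
  -- the fill loop body is F2
  have hF2 : (fun (dp : List (List (List Int))) (i : Nat) =>
      (PySem.List.pyRange 1 ((i : Int)) 1).foldl (fun dp k =>
        dpSet dp ((i : Int)) k (dpGet dp (((i : Int)) - 1) k ++
          (dpGet dp (((i : Int)) - 1) (k - 1)).map
            (fun x => (2 : Int) ^ (((i : Int)) - 1).toNat + x))) dp) = F2 := by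
    funext dp i
    have h1 : PySem.List.pyRange 1 (i : Int) 1 =
        (List.range (i - 1)).map (fun (t : Nat) => ((t + 1 : Nat) : Int)) := by
      rw [PySem.List.pyRange_one]
      have h2 : ((i : Int) - 1).toNat = i - 1 := by omega
      rw [h2]
      exact List.map_congr_left (fun a _ => by push_cast; ring)
    rw [h1, List.foldl_map]
    have h3 : (fun (dp : List (List (List Int))) (t : Nat) =>
        dpSet dp ((i : Int)) (((t + 1 : Nat) : Int)) (dpGet dp (((i : Int)) - 1) (((t + 1 : Nat) : Int)) ++
          (dpGet dp (((i : Int)) - 1) ((((t + 1 : Nat) : Int)) - 1)).map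
            (fun x => (2 : Int) ^ (((i : Int)) - 1).toNat + x))) = G i := by
      funext dp t
      have e1 : ((i : Int) - 1).toNat = i - 1 := by omega
      have e2 : (((t + 1 : Nat) : Int)) - 1 = ((t : Nat) : Int) := by push_cast; ring
      rw [e2]
      simp [dpSet, dpGet, G, set2, get2, e1]
    rw [h3]
    rfl
  rw [hF2]
  unfold target
  apply flatMap_congr_range
  intro k hk
  rw [List.mem_range] at hk
  have hget : dpGet ((List.range (n + 1)).foldl F2 ((List.range (n + 1)).foldl F1 (dp0 n)))
      ((n : Int)) ((k : Int)) =
      get2 ((List.range (n + 1)).foldl F2 ((List.range (n + 1)).foldl F1 (dp0 n))) n k := by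
    simp [dpGet, get2]
  rw [hget, fold2_get2 n (n + 1) le_rfl n k le_rfl (by omega), if_pos (by omega), E_eq_SL n k]
  unfold SL
  rw [List.map_map]
  rfl

lemma B_char (n : Nat) : generate_shot_sequences_alt (n : Int) = target n := by
  unfold generate_shot_sequences_alt
  rw [pyRange_succ_natCast n]
  have h2p : ((2 : Int) ^ ((n : Int)).toNat) = ((2 ^ n : Nat) : Int) := by
    rw [Int.toNat_natCast]
    push_cast
    ring
  rw [h2p, PySem.List.pyRange_zero_natCast, List.flatMap_map]
  unfold target
  apply flatMap_congr_range
  intro k hk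
  rw [List.filter_map,
    List.filter_congr (l := List.range (2 ^ n)) (q := fun v => bc v == k) ?_, List.map_map]
  · rfl
  · intro v hv
    rw [Bool.eq_iff_iff]
    simp only [Function.comp_apply, beq_iff_eq, bc]
    exact ⟨fun h => by exact_mod_cast h, fun h => by exact_mod_cast h⟩

lemma neg_case (N : Int) (hN : N < 0) :
    generate_shot_sequences N = [] ∧ generate_shot_sequences_alt N = [] := by
  have h : PySem.List.pyRange 0 (N + 1) 1 = [] := by
    rw [PySem.List.pyRange_one]
    have : (N + 1 - 0).toNat = 0 := by omega
    rw [this]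
    simp
  constructor
  · rw [generate_shot_sequences]
    simp [h]
  · rw [generate_shot_sequences_alt]
    simp [h]

-- ===== VERDICT (by name: the statement is the Claim_ definition above) =====
theorem generate_shot_sequences_spec : Claim_equal_generate_shot_sequences := by
  intro N _
  unfold Spec_generate_shot_sequences
  rcases Int.lt_or_le N 0 with hN | hN
  · obtain ⟨h1, h2⟩ := neg_case N hN
    rw [h1, h2]
  · obtain ⟨n, rfl⟩ := Int.eq_ofNat_of_zero_le hN
    rw [A_char n, B_char n]
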